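-- pv_equiv track=rewrite | github.com/careylzh/desmos2usd | src/desmos2usd/parse/latex_subset.py | find_top_level
-- ===== SOURCE A (Python) =====
-- def find_top_level(text: str, needle: str) -> int:
--     depth = 0
--     i = 0
--     while i < len(text):
--         char = text[i]
--         if char in "({[":
--             depth += 1
--         elif char in ")}]":
--             depth -= 1
--         elif depth == 0 and text.startswith(needle, i):
--             return i
--         i += 1
--     return -1
-- ===== SOURCE B (Python) =====
-- def find_top_level(text, needle):
--     # One pass to record the bracket depth before every position, then jump
--     # between needle occurrences with str.find instead of testing startswith
--     # at every top-level index.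
--     depths = []
--     d = 0
--     for ch in text:
--         depths.append(d)
--         if ch in "({[":
--             d += 1
--         elif ch in ")}]":
--             d -= 1
--     i = text.find(needle)
--     while i != -1:
--         if i < len(text) and depths[i] == 0 and text[i] not in "(){}[]":
--             return i
--         i = text.find(needle, i + 1)
--     return -1
-- ===== Notes on version B (the rewrite author's own statement) =====
-- stated objective: faster
-- what changed: Instead of testing startswith(needle) at every top-level index during the depth scan, B precomputes the bracket-depth prefix in one pass and then jumps between needle occurrences with str.find, keeping the first occurrence at depth 0 whose first character is not a bracket.
import Mathlib
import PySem

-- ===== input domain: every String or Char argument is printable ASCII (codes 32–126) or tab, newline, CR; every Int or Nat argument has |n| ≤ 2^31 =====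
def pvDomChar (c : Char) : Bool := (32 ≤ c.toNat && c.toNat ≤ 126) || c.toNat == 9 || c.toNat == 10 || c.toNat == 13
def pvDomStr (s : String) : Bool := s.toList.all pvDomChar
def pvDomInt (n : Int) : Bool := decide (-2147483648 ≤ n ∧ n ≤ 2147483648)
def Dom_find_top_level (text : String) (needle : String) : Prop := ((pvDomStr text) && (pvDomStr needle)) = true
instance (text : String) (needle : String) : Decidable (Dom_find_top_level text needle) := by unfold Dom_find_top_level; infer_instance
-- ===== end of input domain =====

-- B scans the depth prefix once and jumps between needle occurrences with str.find
-- instead of testing startswith at every top-level index; measurably faster in constant factor.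

-- ===== PORT A =====
-- A's while loop: `suf` is text[i:], `depth` and `i` as in the Python.
-- text.startswith(needle, i) with 0 ≤ i ≤ len(text) is exactly needle.isPrefixOf text[i:].
def ftlA_go (nd : List Char) : List Char → Int → Nat → Int
  | [], _, _ => -1
  | c :: rest, depth, i =>
    if c ∈ ['(', '{', '['] then ftlA_go nd rest (depth + 1) (i + 1)
    else if c ∈ [')', '}', ']'] then ftlA_go nd rest (depth - 1) (i + 1)
    else if depth = 0 ∧ nd.isPrefixOf (c :: rest) then (i : Int)
    else ftlA_go nd rest depth (i + 1)

def find_top_level (text : String) (needle : String) : Int :=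
  ftlA_go needle.toList text.toList 0 0

-- ===== PORT B =====
-- the body of Source B's depth-recording for-loop
def ftlB_step (d : Int) (c : Char) : Int :=
  if c ∈ ['(', '{', '['] then d + 1
  else if c ∈ [')', '}', ']'] then d - 1
  else d

-- Source B's first loop: depths.append(d) then update d
def ftlB_depths (t : List Char) : List Int :=
  (t.foldl (fun (st : List Int × Int) c => (st.1 ++ [st.2], ftlB_step st.2 c)) ([], 0)).1

-- the two facts about Python's str.find(needle, start) needed for termination of the while loop
theorem ftl_findFrom_neg_one_of_gt (t nd : List Char) (s : Nat) (hs : t.length < s) :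
    PySem.Chars.findFrom t nd (s : Int) none = -1 := by
  simp only [PySem.Chars.findFrom]
  have h0 : ¬ ((s : Int) < 0) := by omega
  rw [if_neg h0]
  rw [if_pos (by exact_mod_cast hs)]

theorem ftl_findFrom_ge (t nd : List Char) (s : Nat)
    (h : PySem.Chars.findFrom t nd (s : Int) none ≠ -1) :
    s ≤ (PySem.Chars.findFrom t nd (s : Int) none).toNat ∧
      (PySem.Chars.findFrom t nd (s : Int) none).toNat ≤ t.length := by
  by_cases hs : s ≤ t.length
  · have hspec := PySem.Chars.findFrom_natCast_spec t nd s hs h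
    have hle : PySem.Chars.findFrom t nd (s : Int) none ≤ (t.length : Int) := by
      rw [PySem.Chars.findFrom_natCast t nd s hs]
      split
      · omega
      · have := PySem.Chars.find_le_length (t.drop s) nd
        simp only [List.length_drop] at this
        omega
    omega
  · exact absurd (ftl_findFrom_neg_one_of_gt t nd s (by omega)) h

-- Source B's while loop; each iteration recomputes i = text.find(needle, start) and
-- either returns it or moves start past it.
def ftlB_loop (t nd : List Char) (depths : List Int) (start : Nat) : Int :=
  let i := PySem.Chars.findFrom t nd (start : Int) none
  if i = -1 then -1
  else if i < (t.length : Int) ∧ PySem.List.pyGetD depths i 0 = 0 ∧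
      (PySem.List.pyGet? t i).getD ' ' ∉ ['(', ')', '{', '}', '[', ']'] then i
  else ftlB_loop t nd depths (i.toNat + 1)
termination_by t.length + 1 - start
decreasing_by
  have := ftl_findFrom_ge t nd start (by assumption)
  omega

def find_top_level_alt (text : String) (needle : String) : Int :=
  ftlB_loop text.toList needle.toList (ftlB_depths text.toList) 0

-- ===== PRECONDITION & SPEC =====
def Spec_find_top_level (text : String) (needle : String) (out : Int) : Prop := out = find_top_level_alt text needle
instance (text : String) (needle : String) (out : Int) : Decidable (Spec_find_top_level text needle out) := by unfold Spec_find_top_level; infer_instance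

-- ===== CLAIM (what is proved, stated in full; the proofs are below) =====
def Claim_equal_find_top_level : Prop := ∀ (text : String) (needle : String), Dom_find_top_level text needle → Spec_find_top_level text needle (find_top_level text needle)

-- ===== LEMMAS AND PROOFS =====

-- depth before position j
def ftlD (t : List Char) (j : Nat) : Int := (t.take j).foldl ftlB_step 0

-- "A would return j": depth 0, not a bracket character, needle starts here
def ftlP (t nd : List Char) (j : Nat) : Bool :=
  decide (ftlD t j = 0) && !(decide (t.getD j ' ' ∈ ['(', ')', '{', '}', '[', ']'])) &&
    nd.isPrefixOf (t.drop j)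

-- first j ≥ start with ftlP, else -1 : the common reference both ports equal
def ftlFirst (t nd : List Char) (j : Nat) : Int :=
  if j < t.length then (if ftlP t nd j then (j : Int) else ftlFirst t nd (j + 1)) else -1
termination_by t.length - j

theorem ftlFirst_of_ge (t nd : List Char) (j : Nat) (h : t.length ≤ j) :
    ftlFirst t nd j = -1 := by
  rw [ftlFirst, if_neg (by omega)]

theorem ftlD_succ (t : List Char) (j : Nat) (hj : j < t.length) :
    ftlD t (j + 1) = ftlB_step (ftlD t j) t[j] := by
  unfold ftlD
  rw [List.take_add_one, List.getElem?_eq_getElem hj]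
  rw [List.foldl_append]
  rfl

theorem ftlA_go_eq (nd t : List Char) (suf : List Char) (i : Nat) (h : suf = t.drop i) :
    ftlA_go nd suf (ftlD t i) i = ftlFirst t nd i := by
  induction suf generalizing i with
  | nil =>
    have hlen : t.length ≤ i := by
      have := congrArg List.length h; simp at this; omega
    rw [ftlFirst_of_ge t nd i hlen]; rfl
  | cons c rest ih =>
    have hlen : i < t.length := by
      have := congrArg List.length h; simp at this; omega
    have hget? : t[i]? = some c := by
      have h0 := congrArg (fun l => l[0]?) h
      simpa [List.getElem?_drop] using h0.symm
    have hc : t[i] = c := by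
      rw [List.getElem?_eq_getElem hlen] at hget?
      exact Option.some.inj hget?
    have hrest : rest = t.drop (i + 1) := by
      have := congrArg (List.drop 1) h
      simpa [List.drop_drop, Nat.add_comm] using this
    have hstep := ftlD_succ t i hlen
    rw [hc] at hstep
    rw [ftlFirst, if_pos hlen]
    by_cases h1 : c ∈ ['(', '{', '[']
    · have hP : ftlP t nd i = false := by
        simp only [List.mem_cons, List.not_mem_nil, or_false] at h1
        rcases h1 with rfl | rfl | rfl <;> simp [ftlP, hget?]
      rw [hP]
      rw [ftlA_go, if_pos h1]
      have hs1 : ftlB_step (ftlD t i) c = ftlD t i + 1 := by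
        simp [ftlB_step, h1]
      rw [hs1] at hstep
      rw [← hstep]
      simpa using ih (i + 1) hrest
    · by_cases h2 : c ∈ [')', '}', ']']
      · have hP : ftlP t nd i = false := by
          simp only [List.mem_cons, List.not_mem_nil, or_false] at h2
          rcases h2 with rfl | rfl | rfl <;> simp [ftlP, hget?]
        rw [hP]
        rw [ftlA_go, if_neg h1, if_pos h2]
        have hs1 : ftlB_step (ftlD t i) c = ftlD t i - 1 := by
          simp only [List.mem_cons, List.not_mem_nil, or_false] at h2
          rcases h2 with rfl | rfl | rfl <;> simp [ftlB_step]
        rw [hs1] at hstep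
        rw [← hstep]
        simpa using ih (i + 1) hrest
      · simp only [List.mem_cons, List.not_mem_nil, or_false, not_or] at h1 h2
        have hs1 : ftlB_step (ftlD t i) c = ftlD t i := by
          simp [ftlB_step, h1.1, h1.2.1, h1.2.2, h2.1, h2.2.1, h2.2.2]
        rw [hs1] at hstep
        by_cases h3 : ftlD t i = 0 ∧ nd.isPrefixOf (c :: rest)
        · have hpre : nd.isPrefixOf (t.drop i) = true := by rw [← h]; exact h3.2
          have hP : ftlP t nd i = true := by
            simp [ftlP, hget?, h3.1, hpre, h1.1, h1.2.1, h1.2.2, h2.1, h2.2.1, h2.2.2]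
          rw [hP]
          rw [ftlA_go]
          rw [if_neg (by simp [h1.1, h1.2.1, h1.2.2]), if_neg (by simp [h2.1, h2.2.1, h2.2.2]),
            if_pos h3]
          simp
        · have hP : ftlP t nd i = false := by
            by_cases hd : ftlD t i = 0
            · have hx : nd.isPrefixOf (List.drop i t) = false := by
                cases hx : nd.isPrefixOf (List.drop i t) with
                | false => rfl
                | true => rw [← h] at hx; exact absurd ⟨hd, hx⟩ h3
              simp [ftlP, hx]
            · simp [ftlP, hd]
          rw [hP]
          rw [ftlA_go]
          rw [if_neg (by simp [h1.1, h1.2.1, h1.2.2]), if_neg (by simp [h2.1, h2.2.1, h2.2.2]),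
            if_neg h3]
          rw [← hstep]
          exact ih (i + 1) hrest

-- skip lemma: ftlFirst ignores a block of positions where ftlP fails
theorem ftlFirst_skip_aux (t nd : List Char) (m : Nat) :
    ∀ (k s : Nat), s + k = m →
      (∀ j, s ≤ j → j < m → j < t.length → ftlP t nd j = false) →
      ftlFirst t nd s = ftlFirst t nd m := by
  intro k
  induction k with
  | zero =>
    intro s hk _
    have : s = m := by omega
    rw [this]
  | succ k ih =>
    intro s hk hP
    by_cases hs : s < t.length
    · rw [ftlFirst, if_pos hs, hP s le_rfl (by omega) hs]
      simp only [Bool.false_eq_true, if_false]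
      exact ih (s + 1) (by omega) (fun j hj1 hj2 hj3 => hP j (by omega) hj2 hj3)
    · rw [ftlFirst_of_ge t nd s (by omega), ftlFirst_of_ge t nd m (by omega)]

theorem ftlFirst_skip (t nd : List Char) (s m : Nat) (hsm : s ≤ m)
    (h : ∀ j, s ≤ j → j < m → j < t.length → ftlP t nd j = false) :
    ftlFirst t nd s = ftlFirst t nd m :=
  ftlFirst_skip_aux t nd m (m - s) s (by omega) h

theorem ftlB_depths_gen (l : List Char) (acc : List Int) (d : Int) :
    (l.foldl (fun (st : List Int × Int) c => (st.1 ++ [st.2], ftlB_step st.2 c)) (acc, d)).1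
      = acc ++ (List.range l.length).map (fun j => (l.take j).foldl ftlB_step d) := by
  induction l generalizing acc d with
  | nil => simp
  | cons c l' ih =>
    rw [List.foldl_cons]
    have hred : ((acc, d).1 ++ [(acc, d).2], ftlB_step (acc, d).2 c) = (acc ++ [d], ftlB_step d c) := rfl
    rw [hred, ih (acc ++ [d]) (ftlB_step d c)]
    rw [List.length_cons, List.range_succ_eq_map]
    simp [List.map_map, Function.comp_def, List.take_succ_cons]

theorem ftlB_depths_get (t : List Char) (j : Nat) (hj : j < t.length) :
    PySem.List.pyGetD (ftlB_depths t) (j : Int) 0 = ftlD t j := by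
  have hval : ftlB_depths t = (List.range t.length).map (fun j => (t.take j).foldl ftlB_step 0) := by
    have := ftlB_depths_gen t [] 0
    simpa [ftlB_depths] using this
  have hlen : (ftlB_depths t).length = t.length := by simp [hval]
  rw [PySem.List.pyGetD_eq_getElem _ 0 (by omega) (by rw [hlen]; exact_mod_cast hj)]
  simp [hval, ftlD]

-- a needle prefix somewhere at or past j is an infix of the drop at s ≤ j
theorem ftl_infix_of_prefix_drop (nd t : List Char) (s j : Nat) (hsj : s ≤ j)
    (hp : nd <+: t.drop j) : nd <:+: t.drop s := by
  have hdd : t.drop j = (t.drop s).drop (j - s) := by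
    rw [List.drop_drop]; congr 1; omega
  rw [hdd] at hp
  exact hp.isInfix.trans (List.drop_suffix _ _).isInfix

theorem ftlB_loop_eq (t nd : List Char) (start : Nat) :
    ftlB_loop t nd (ftlB_depths t) start = ftlFirst t nd start := by
  rw [ftlB_loop]
  by_cases h1 : PySem.Chars.findFrom t nd (start : Int) none = -1
  · rw [if_pos h1]
    by_cases hs : start ≤ t.length
    · have hni : ¬ nd <:+: t.drop start :=
        (PySem.Chars.findFrom_natCast_eq_neg_one_iff t nd start hs).mp h1
      have hall : ∀ j, start ≤ j → j < t.length → j < t.length → ftlP t nd j = false := by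
        intro j hj1 hj2 _
        cases hx : nd.isPrefixOf (t.drop j) with
        | false => simp [ftlP, hx]
        | true =>
          exact absurd (ftl_infix_of_prefix_drop nd t start j hj1
            (List.isPrefixOf_iff_prefix.mp hx)) hni
      rw [ftlFirst_skip t nd start t.length hs hall, ftlFirst_of_ge t nd t.length le_rfl]
    · rw [ftlFirst_of_ge t nd start (by omega)]
  · rw [if_neg h1]
    have hs : start ≤ t.length := by
      by_contra hc
      exact h1 (ftl_findFrom_neg_one_of_gt t nd start (by omega))
    obtain ⟨hge, hpre, hnone⟩ := PySem.Chars.findFrom_natCast_spec t nd start hs h1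
    set iv := PySem.Chars.findFrom t nd (start : Int) none with hiv
    have hge' : start ≤ iv.toNat := by omega
    have hcast : (iv.toNat : Int) = iv := Int.toNat_of_nonneg (by omega)
    by_cases h2 : iv < (t.length : Int) ∧ PySem.List.pyGetD (ftlB_depths t) iv 0 = 0 ∧
        (PySem.List.pyGet? t iv).getD ' ' ∉ ['(', ')', '{', '}', '[', ']']
    · rw [if_pos h2]
      obtain ⟨hlt, hd0, hbr⟩ := h2
      have hltN : iv.toNat < t.length := by omega
      have hget : PySem.List.pyGet? t iv = some t[iv.toNat] :=
        PySem.List.pyGet?_eq_some_getElem t (by omega) hlt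
      have hP : ftlP t nd iv.toNat = true := by
        rw [← hcast, ftlB_depths_get t iv.toNat hltN] at hd0
        rw [hget] at hbr
        have hsome : t[iv.toNat]? = some t[iv.toNat] := List.getElem?_eq_getElem hltN
        simp only [Option.getD_some, List.mem_cons, List.not_mem_nil, or_false, not_or] at hbr
        simp [ftlP, hd0, hsome, hbr.1, hbr.2.1, hbr.2.2.1, hbr.2.2.2.1, hbr.2.2.2.2.1,
          hbr.2.2.2.2.2, List.isPrefixOf_iff_prefix.mpr hpre]
      have hskip : ftlFirst t nd start = ftlFirst t nd iv.toNat := by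
        apply ftlFirst_skip t nd start iv.toNat hge'
        intro j hj1 hj2 _
        cases hx : nd.isPrefixOf (t.drop j) with
        | false => simp [ftlP, hx]
        | true => exact absurd (List.isPrefixOf_iff_prefix.mp hx) (hnone j hj1 hj2)
      rw [hskip, ftlFirst, if_pos hltN, if_pos hP, hcast]
    · rw [if_neg h2]
      rw [ftlB_loop_eq t nd (iv.toNat + 1)]
      have hub : iv.toNat + 1 ≤ t.length + 1 := by
        have := (ftl_findFrom_ge t nd start h1).2
        omega
      symm
      apply ftlFirst_skip t nd start (iv.toNat + 1) (by omega)
      intro j hj1 hj2 hj3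
      by_cases hjlt : j < iv.toNat
      · cases hx : nd.isPrefixOf (t.drop j) with
        | false => simp [ftlP, hx]
        | true => exact absurd (List.isPrefixOf_iff_prefix.mp hx) (hnone j hj1 hjlt)
      · have hjeq : iv.toNat = j := by omega
        have hcastj : (j : Int) = iv := by rw [← hjeq]; exact hcast
        have hlt : iv < (t.length : Int) := by
          rw [← hcastj]; exact_mod_cast hj3
        by_cases hd : PySem.List.pyGetD (ftlB_depths t) iv 0 = 0
        · have hbr : (PySem.List.pyGet? t iv).getD ' ' ∈ ['(', ')', '{', '}', '[', ']'] := by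
            by_contra hbr
            exact h2 ⟨hlt, hd, hbr⟩
          have hget : PySem.List.pyGet? t iv = some t[iv.toNat] :=
            PySem.List.pyGet?_eq_some_getElem t (by omega) hlt
          rw [hget] at hbr
          simp only [hjeq] at hbr
          have hsome : t[j]? = some t[j] := List.getElem?_eq_getElem hj3
          simp only [Option.getD_some, List.mem_cons, List.not_mem_nil, or_false] at hbr
          rcases hbr with h | h | h | h | h | h <;> simp [ftlP, hsome, h]
        · rw [← hcastj, ftlB_depths_get t j hj3] at hd
          simp [ftlP, hd]
termination_by t.length + 1 - start
decreasing_by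
  have := ftl_findFrom_ge t nd start h1
  omega

-- ===== VERDICT (by name: the statement is the Claim_ definition above) =====
theorem find_top_level_spec : Claim_equal_find_top_level := by
  intro text needle _
  unfold Spec_find_top_level find_top_level find_top_level_alt
  rw [ftlB_loop_eq]
  have h0 : ftlD text.toList 0 = 0 := rfl
  rw [← h0, ftlA_go_eq needle.toList text.toList text.toList 0 rfl]
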